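-- pv_equiv track=rewrite | github.com/Spruked/Digital-Assets-Logistics-System-DALS | Vault_System_1.0/vault_system/vault_core/glyph_generator.py | _find_fibonacci_relation
-- ===== SOURCE A (Python) =====
-- from typing import Dict, Any, List, Optional, Tuple
--
-- def _find_fibonacci_relation(n: int) -> Dict[str, Any]:
--     """Find relation to Fibonacci sequence"""
--     fib_sequence = [0, 1]
--     while fib_sequence[-1] < n:
--         fib_sequence.append(fib_sequence[-1] + fib_sequence[-2])
--
--     # Find closest Fibonacci numbers
--     closest_lower = max([f for f in fib_sequence if f <= n], default=0)
--     closest_higher = min([f for f in fib_sequence if f >= n], default=n)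
--
--     return {
--         "closest_lower": closest_lower,
--         "closest_higher": closest_higher,
--         "distance_to_lower": n - closest_lower,
--         "distance_to_higher": closest_higher - n
--     }
-- ===== SOURCE B (Python) =====
-- def _find_fibonacci_relation(n: int):
--     """Find relation to Fibonacci sequence (single incremental pass, no stored list)."""
--     if n <= 0:
--         lower = higher = 0
--     else:
--         a, b = 0, 1
--         while b < n:
--             a, b = b, a + b
--         higher = b
--         lower = b if b == n else a
--     return {
--         "closest_lower": lower,
--         "closest_higher": higher,
--         "distance_to_lower": n - lower,
--         "distance_to_higher": higher - n,
--     }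
-- ===== Notes on version B (the rewrite author's own statement) =====
-- stated objective: simpler
-- what changed: B generates Fibonacci pairs incrementally and keeps only the last two terms, reading the bracketing values straight off the final pair, instead of materialising the whole list and then running two filter-and-extremum passes over it.
import Mathlib
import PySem

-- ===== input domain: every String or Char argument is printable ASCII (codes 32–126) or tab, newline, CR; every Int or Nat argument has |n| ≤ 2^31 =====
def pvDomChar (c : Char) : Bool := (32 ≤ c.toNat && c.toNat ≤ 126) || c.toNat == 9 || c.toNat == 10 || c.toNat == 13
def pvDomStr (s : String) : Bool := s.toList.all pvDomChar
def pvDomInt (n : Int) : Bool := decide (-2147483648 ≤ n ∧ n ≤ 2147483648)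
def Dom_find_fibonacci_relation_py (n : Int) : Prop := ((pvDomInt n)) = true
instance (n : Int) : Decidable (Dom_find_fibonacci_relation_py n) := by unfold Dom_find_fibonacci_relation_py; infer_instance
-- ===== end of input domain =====

-- B replaces A's build-the-whole-list-then-filter-twice computation by a single
-- incremental Fibonacci loop keeping only the last two terms (objective: simpler).

-- ===== PORT A =====
-- while fib_sequence[-1] < n: fib_sequence.append(fib_sequence[-1] + fib_sequence[-2])
-- (prev, last) carry fib_sequence[-2], fib_sequence[-1]; the proof argument only
-- justifies termination, it does not alter the computation.
def fibBuild (n prev last : Int) (fs : List Int)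
    (h : 0 ≤ prev ∧ prev ≤ last ∧ 1 ≤ last) : List Int :=
  if hlt : last < n then
    fibBuild n last (last + prev) (fs ++ [last + prev]) ⟨by omega, by omega, by omega⟩
  else fs
termination_by (2 * n - last - prev).toNat
decreasing_by omega

def find_fibonacci_relation_py (n : Int) : List (String × Int) :=
  let fs := fibBuild n 0 1 [0, 1] ⟨by omega, by omega, by omega⟩
  let closest_lower := match PySem.List.max? (fs.filter (fun f => decide (f ≤ n))) (fun x => x) with
    | some m => m
    | none => 0
  let closest_higher := match PySem.List.min? (fs.filter (fun f => decide (n ≤ f))) (fun x => x) with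
    | some m => m
    | none => n
  [("closest_lower", closest_lower),
   ("closest_higher", closest_higher),
   ("distance_to_lower", n - closest_lower),
   ("distance_to_higher", closest_higher - n)]

-- ===== PORT B =====
-- while b < n: a, b = b, a + b   (only the last two terms are kept)
def bLoop (n a b : Int) (h : 0 ≤ a ∧ a ≤ b ∧ 1 ≤ b) : Int × Int :=
  if hlt : b < n then bLoop n b (a + b) ⟨by omega, by omega, by omega⟩
  else (a, b)
termination_by (2 * n - a - b).toNat
decreasing_by omega

def find_fibonacci_relation_py_alt (n : Int) : List (String × Int) :=
  let lh : Int × Int :=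
    if n ≤ 0 then (0, 0)
    else
      let p := bLoop n 0 1 ⟨by omega, by omega, by omega⟩
      (if p.2 = n then p.2 else p.1, p.2)
  [("closest_lower", lh.1),
   ("closest_higher", lh.2),
   ("distance_to_lower", n - lh.1),
   ("distance_to_higher", lh.2 - n)]

-- ===== PRECONDITION & SPEC =====
def Spec_find_fibonacci_relation_py (n : Int) (out : List (String × Int)) : Prop := out = find_fibonacci_relation_py_alt n
instance (n : Int) (out : List (String × Int)) : Decidable (Spec_find_fibonacci_relation_py n out) := by unfold Spec_find_fibonacci_relation_py; infer_instance

-- ===== CLAIM (what is proved, stated in full; the proofs are below) =====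
def Claim_equal_find_fibonacci_relation_py : Prop := ∀ (n : Int), Dom_find_fibonacci_relation_py n → Spec_find_fibonacci_relation_py n (find_fibonacci_relation_py n)

-- ===== LEMMAS AND PROOFS =====

-- fibBuild only appends: the accumulator is a prefix of the result.
theorem fibBuild_append_k (n : Int) : ∀ (k : Nat) (prev last : Int) (fs : List Int)
    (h : 0 ≤ prev ∧ prev ≤ last ∧ 1 ≤ last), (2 * n - last - prev).toNat ≤ k →
    fibBuild n prev last fs h = fs ++ fibBuild n prev last [] h := by
  intro k
  induction k with
  | zero =>
      intro prev last fs h hk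
      have hlt : ¬ last < n := by omega
      rw [fibBuild, dif_neg hlt]
      conv_rhs => rw [fibBuild, dif_neg hlt]
      simp
  | succ k ih =>
      intro prev last fs h hk
      by_cases hlt : last < n
      · rw [fibBuild, dif_pos hlt]
        rw [ih last (last + prev) (fs ++ [last + prev]) ⟨by omega, by omega, by omega⟩ (by omega)]
        conv_rhs => rw [fibBuild, dif_pos hlt]
        rw [ih last (last + prev) ([] ++ [last + prev]) ⟨by omega, by omega, by omega⟩ (by omega)]
        simp
      · rw [fibBuild, dif_neg hlt]
        conv_rhs => rw [fibBuild, dif_neg hlt]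
        simp

theorem fibBuild_append (n prev last : Int) (fs : List Int)
    (h : 0 ≤ prev ∧ prev ≤ last ∧ 1 ≤ last) :
    fibBuild n prev last fs h = fs ++ fibBuild n prev last [] h :=
  fibBuild_append_k n (2 * n - last - prev).toNat prev last fs h le_rfl

theorem foldl_max_eq (v : Int) : ∀ (l : List Int) (x : Int),
    (∀ y ∈ l, y ≤ v) → x ≤ v → (v = x ∨ v ∈ l) → l.foldl max x = v := by
  intro l
  induction l with
  | nil => intro x _ hx hv; rcases hv with h | h; · simp [h.symm]
           · cases h
  | cons y t ih =>
      intro x hall hx hv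
      simp only [List.foldl_cons]
      apply ih
      · intro z hz; exact hall z (List.mem_cons_of_mem _ hz)
      · exact max_le hx (hall y (List.mem_cons_self))
      · rcases hv with h | h
        · subst h
          left; exact (max_eq_left (hall y List.mem_cons_self)).symm
        · rcases List.mem_cons.mp h with h' | h'
          · subst h'; left; exact (max_eq_right hx).symm
          · right; exact h'

-- Main invariant: from a state (a, b) with b < n, the tail that A's loop appends,
-- prefixed with b, has exactly one element ≥ n (B's final b) and its elements ≤ n
-- are all bounded by B's reported lower value, which itself occurs in the list.
theorem main_inv (n : Int) : ∀ (k : Nat) (a b : Int), 0 ≤ a → a ≤ b → 1 ≤ b →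
    b < n → (2 * n - a - b).toNat ≤ k →
    ∀ (h : 0 ≤ a ∧ a ≤ b ∧ 1 ≤ b),
    let p := bLoop n a b h
    let T := b :: fibBuild n a b [] h
    let v := if p.2 = n then n else p.1
    (T.filter (fun f => decide (n ≤ f)) = [p.2]) ∧
    (v ∈ T) ∧ (v ≤ n) ∧ (∀ x ∈ T, x ≤ n → x ≤ v) ∧ (b ≤ v) := by
  intro k
  induction k with
  | zero => intro a b ha hab hb hbn hk h; exfalso; omega
  | succ k ih =>
      intro a b ha hab hb hbn hk h
      have hstep : fibBuild n a b [] h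
          = (a + b) :: fibBuild n b (a + b) [] ⟨by omega, by omega, by omega⟩ := by
        rw [fibBuild]
        simp only [hbn, dif_pos, show b + a = a + b from by ring]
        rw [fibBuild_append n b (a + b)]
        simp
      have hploop : bLoop n a b h = bLoop n b (a + b) ⟨by omega, by omega, by omega⟩ := by
        rw [bLoop]; simp [hbn]
      by_cases hc : a + b < n
      · -- loop continues from (b, a+b)
        have := ih b (a + b) (by omega) (by omega) (by omega) hc (by omega)
          ⟨by omega, by omega, by omega⟩
        simp only at this ⊢
        obtain ⟨h1, h2, h3, h4, h5⟩ := this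
        rw [hstep, hploop]
        refine ⟨?_, ?_, ?_, ?_, ?_⟩
        · rw [List.filter_cons]
          simp only [decide_eq_true_eq]
          rw [if_neg (by omega)]
          exact h1
        · exact List.mem_cons_of_mem _ h2
        · exact h3
        · intro x hx hxn
          rcases List.mem_cons.mp hx with h' | h'
          · subst h'; omega
          · exact h4 x h' hxn
        · omega
      · -- loop stops: tail is [a+b], final pair (b, a+b)
        have htail : fibBuild n b (a + b) [] ⟨by omega, by omega, by omega⟩ = [] := by
          rw [fibBuild]; simp [hc]
        have hpstop : bLoop n b (a + b) ⟨by omega, by omega, by omega⟩ = (b, a + b) := by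
          rw [bLoop]; simp [hc]
        simp only
        rw [hstep, htail, hploop, hpstop]
        simp only
        by_cases he : a + b = n
        · refine ⟨?_, ?_, ?_, ?_, ?_⟩
          · simp only [List.filter_cons, List.filter_nil, decide_eq_true_eq]
            rw [if_neg (by omega), if_pos (by omega)]
          · rw [if_pos he]
            simp only [List.mem_cons, List.not_mem_nil, or_false]
            omega
          · rw [if_pos he]
          · intro x hx hxn
            rw [if_pos he]
            simp only [List.mem_cons, List.not_mem_nil, or_false] at hx
            rcases hx with rfl | rfl <;> omega
          · rw [if_pos he]; omega
        · refine ⟨?_, ?_, ?_, ?_, ?_⟩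
          · simp only [List.filter_cons, List.filter_nil, decide_eq_true_eq]
            rw [if_neg (by omega), if_pos (by omega)]
          · rw [if_neg he]
            simp
          · rw [if_neg he]; omega
          · intro x hx hxn
            rw [if_neg he]
            simp only [List.mem_cons, List.not_mem_nil, or_false] at hx
            rcases hx with rfl | rfl <;> omega
          · rw [if_neg he]

-- ===== VERDICT (by name: the statement is the Claim_ definition above) =====
theorem find_fibonacci_relation_py_spec : Claim_equal_find_fibonacci_relation_py := by
  intro n _
  unfold Spec_find_fibonacci_relation_py
  unfold find_fibonacci_relation_py find_fibonacci_relation_py_alt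
  dsimp only
  by_cases hn : n ≤ 0
  · -- loop never runs; fs = [0, 1]
    have hfs : fibBuild n 0 1 [0, 1] ⟨by omega, by omega, by omega⟩ = [0, 1] := by
      rw [fibBuild]; simp; omega
    rw [hfs, if_pos hn]
    by_cases h0 : n = 0
    · subst h0; decide
    · simp only [List.filter_cons, List.filter_nil, decide_eq_true_eq]
      rw [if_neg (by omega), if_neg (by omega), if_pos (by omega), if_pos (by omega)]
      simp [PySem.List.min?_id_cons, PySem.List.max?]
  · by_cases h1 : n = 1
    · subst h1
      have hfs : fibBuild 1 0 1 [0, 1] ⟨by omega, by omega, by omega⟩ = [0, 1] := by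
        rw [fibBuild]; simp
      have hb : bLoop 1 0 1 ⟨by omega, by omega, by omega⟩ = (0, 1) := by
        rw [bLoop]; simp
      rw [hfs, hb]
      decide
    · -- n ≥ 2: the loop runs; use the invariant from state (0, 1)
      have hn2 : 2 ≤ n := by omega
      obtain ⟨h1', h2', h3', h4', h5'⟩ :=
        main_inv n (2 * n - 1).toNat 0 1 (by omega) (by omega) (by omega) (by omega)
          (by omega) ⟨by omega, by omega, by omega⟩
      rw [if_neg hn]
      set p := bLoop n 0 1 ⟨by omega, by omega, by omega⟩ with hp
      set t := fibBuild n 0 1 [] ⟨by omega, by omega, by omega⟩ with ht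
      set v : Int := if p.2 = n then n else p.1 with hv
      have hfull : fibBuild n 0 1 [0, 1] ⟨by omega, by omega, by omega⟩ = 0 :: 1 :: t := by
        rw [fibBuild_append n 0 1 [0, 1]]; rfl
      rw [hfull]
      -- higher = p.2
      have hhi : (0 :: 1 :: t).filter (fun f => decide (n ≤ f)) = [p.2] := by
        rw [List.filter_cons]
        simp only [decide_eq_true_eq]
        rw [if_neg (by omega)]
        exact h1'
      rw [hhi]
      -- lower = v
      have hlo : (0 :: 1 :: t).filter (fun f => decide (f ≤ n)) =
          0 :: (1 :: t).filter (fun f => decide (f ≤ n)) := by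
        rw [List.filter_cons]
        simp only [decide_eq_true_eq]
        rw [if_pos (by omega)]
      rw [hlo, PySem.List.max?_id_cons]
      have hmax : ((1 :: t).filter (fun f => decide (f ≤ n))).foldl max 0 = v := by
        apply foldl_max_eq
        · intro y hy
          have := List.mem_filter.mp hy
          exact h4' y this.1 (by simpa using this.2)
        · omega
        · right
          exact List.mem_filter.mpr ⟨h2', by simpa using h3'⟩
      rw [hmax, PySem.List.min?_id_cons]
      simp only [List.foldl_nil]
      have hvv : v = if p.2 = n then p.2 else p.1 := by
        by_cases he : p.2 = n <;> simp [hv, he]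
      rw [hvv]
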